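-- pv_equiv track=rewrite | github.com/isaac-sim/IsaacSim | source/extensions/isaacsim.xr.input_devices/python/impl/xr_utils.py | get_vive_wrist_ids
-- ===== SOURCE A (Python) =====
-- from typing import Dict, List, Tuple
--
-- def get_vive_wrist_ids(vive_data: Dict):
--     """Return tuple (wm0_id, wm1_id) if available, else Nones. Sort by key for stability."""
--     wm_ids = [k for k in vive_data.keys() if len(k) >= 2 and k[:2] == 'WM']
--     wm_ids.sort()
--     if len(wm_ids) >= 2:
--         return wm_ids[0], wm_ids[1]
--     if len(wm_ids) == 1:
--         return wm_ids[0], None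
--     return None, None
-- ===== SOURCE B (Python) =====
-- def get_vive_wrist_ids(vive_data):
--     """Return tuple (wm0_id, wm1_id) if available, else Nones.
--     One pass over the keys, tracking the two lexically smallest 'WM'-prefixed keys."""
--     first = None
--     second = None
--     for k in vive_data:
--         if not k.startswith('WM'):
--             continue
--         if first is None:
--             first = k
--         elif k < first:
--             second = first
--             first = k
--         elif second is None or k < second:
--             second = k
--     return first, second
-- ===== Notes on version B (the rewrite author's own statement) =====
-- stated objective: alternative
-- what changed: Replaces A's build-filtered-list + sort + index selection with a single pass over the dict keys that maintains the two lexicographically smallest 'WM'-prefixed keys seen so far (and uses startswith instead of a slice comparison).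
import Mathlib
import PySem

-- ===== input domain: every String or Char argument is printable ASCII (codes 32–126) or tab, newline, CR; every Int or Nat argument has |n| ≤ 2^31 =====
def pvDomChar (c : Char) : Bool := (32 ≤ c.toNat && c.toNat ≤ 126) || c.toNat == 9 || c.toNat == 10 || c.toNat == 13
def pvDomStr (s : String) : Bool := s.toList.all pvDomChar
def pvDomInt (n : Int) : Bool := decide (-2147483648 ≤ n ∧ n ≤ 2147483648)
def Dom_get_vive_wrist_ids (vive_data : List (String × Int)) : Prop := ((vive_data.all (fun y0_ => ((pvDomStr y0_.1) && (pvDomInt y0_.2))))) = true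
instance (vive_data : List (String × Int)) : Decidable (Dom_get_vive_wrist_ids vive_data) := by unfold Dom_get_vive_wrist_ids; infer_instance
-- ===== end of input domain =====

-- B replaces A's filter+sort+index with a single pass over the keys maintaining the two
-- lexically smallest 'WM'-prefixed keys seen so far (objective: alternative algorithm).

-- ===== PORT A =====
-- 'len(k) >= 2 and k[:2] == "WM"'
def pvWMKeyA (k : String) : Bool :=
  decide ((2 : Int) ≤ PySem.Str.len k) && (PySem.Str.slice k none (some 2) == "WM")

def get_vive_wrist_ids (vive_data : List (String × Int)) : Option String × Option String :=
  let wm_ids0 := (PySem.List.dedup (vive_data.map Prod.fst)).filter pvWMKeyA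
  let wm_ids := PySem.List.sorted wm_ids0 (fun k => k)
  if 2 ≤ wm_ids.length then (wm_ids[0]?, wm_ids[1]?)
  else if wm_ids.length = 1 then (wm_ids[0]?, none)
  else (none, none)

-- ===== PORT B =====
-- one iteration of B's loop body on a matching key, state = (first, second)
def pvWMStep (st : Option String × Option String) (k : String) : Option String × Option String :=
  match st with
  | (none, s) => (some k, s)
  | (some f, s) =>
    if k < f then (some k, some f)
    else
      match s with
      | none => (some f, some k)
      | some sv => if k < sv then (some f, some k) else (some f, some sv)

def get_vive_wrist_ids_alt (vive_data : List (String × Int)) : Option String × Option String :=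
  (PySem.List.dedup (vive_data.map Prod.fst)).foldl
    (fun st k => if PySem.Str.startswith k "WM" then pvWMStep st k else st) (none, none)

-- ===== PRECONDITION & SPEC =====
def Spec_get_vive_wrist_ids (vive_data : List (String × Int)) (out : Option String × Option String) : Prop := out = get_vive_wrist_ids_alt vive_data
instance (vive_data : List (String × Int)) (out : Option String × Option String) : Decidable (Spec_get_vive_wrist_ids vive_data out) := by unfold Spec_get_vive_wrist_ids; infer_instance

-- ===== CLAIM (what is proved, stated in full; the proofs are below) =====
def Claim_equal_get_vive_wrist_ids : Prop := ∀ (vive_data : List (String × Int)), Dom_get_vive_wrist_ids vive_data → Spec_get_vive_wrist_ids vive_data (get_vive_wrist_ids vive_data)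

-- ===== LEMMAS AND PROOFS =====

-- the first two elements of a list, as A's tail branches produce them
def pvFirstTwo (l : List String) : Option String × Option String := (l[0]?, l[1]?)

-- A's filter test and B's startswith are the same predicate
lemma pvPredChars (cs : List Char) :
    (decide ((2:Int) ≤ (cs.length : Int)) && decide (cs.take 2 = ['W','M'])) = "WM".toList.isPrefixOf cs := by
  match cs with
  | [] => rfl
  | [a] => show _ = ['W','M'].isPrefixOf [a]; simp [List.isPrefixOf]
  | a :: b :: t =>
      show _ = ['W','M'].isPrefixOf _
      have hl : decide ((2:Int) ≤ ((a::b::t).length : Int)) = true := by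
        simp; omega
      simp only [hl, Bool.true_and, List.take_succ_cons, List.take_zero, List.isPrefixOf,
        Bool.and_true]
      rw [Bool.eq_iff_iff]
      simp only [decide_eq_true_eq, Bool.and_eq_true, beq_iff_eq, List.cons.injEq, and_true]
      constructor <;> rintro ⟨rfl, rfl⟩ <;> exact ⟨rfl, rfl⟩

lemma pvPred_eq (k : String) : pvWMKeyA k = PySem.Str.startswith k "WM" := by
  unfold pvWMKeyA
  simp only [PySem.Str.len_eq, PySem.Str.slice, PySem.Str.startswith_eq, PySem.Chars.startswith,
    PySem.Chars.slice]
  rw [show PySem.List.slice k.toList none (some 2) = k.toList.take 2 from by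
    rw [PySem.List.slice_to k.toList (by norm_num)]; rfl]
  rw [show (String.ofList (k.toList.take 2) == "WM") = decide (k.toList.take 2 = ['W','M']) from by
    rcases Bool.eq_false_or_eq_true (String.ofList (k.toList.take 2) == "WM") with h | h <;>
      simp_all [String.ext_iff]]
  rw [← pvPredChars k.toList]
  simp

-- inserting into the (sorted) accumulator changes its first two elements exactly as pvWMStep does
lemma pvFirstTwo_insertBy (x : String) (acc : List String) :
    pvFirstTwo (PySem.List.insertBy (fun a b => decide (a < b)) x acc)
      = pvWMStep (pvFirstTwo acc) x := by
  match acc with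
  | [] => rfl
  | [a] =>
      by_cases h1 : x < a <;> simp [PySem.List.insertBy, pvFirstTwo, pvWMStep, h1]
  | a :: b :: t =>
      by_cases h1 : x < a
      · simp [PySem.List.insertBy, pvFirstTwo, pvWMStep, h1]
      · by_cases h2 : x < b <;> simp [PySem.List.insertBy, pvFirstTwo, pvWMStep, h1, h2]

-- the two-min fold is the first two elements of the insertion-sort fold
lemma pvFoldl_step (l acc : List String) :
    l.foldl pvWMStep (pvFirstTwo acc)
      = pvFirstTwo (l.foldl (fun a x => PySem.List.insertBy (fun a b => decide (a < b)) x a) acc) := by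
  induction l generalizing acc with
  | nil => rfl
  | cons x t ih =>
      simp only [List.foldl_cons, ← pvFirstTwo_insertBy]
      exact ih _

-- A's branch structure returns exactly the first two elements
lemma pvBranches (l : List String) :
    (if 2 ≤ l.length then (l[0]?, l[1]?)
     else if l.length = 1 then (l[0]?, (none : Option String))
     else (none, none)) = pvFirstTwo l := by
  match l with
  | [] => rfl
  | [a] => rfl
  | a :: b :: t => simp [pvFirstTwo]

-- ===== VERDICT (by name: the statement is the Claim_ definition above) =====
theorem get_vive_wrist_ids_spec : Claim_equal_get_vive_wrist_ids := by
  intro vd _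
  show get_vive_wrist_ids vd = get_vive_wrist_ids_alt vd
  unfold get_vive_wrist_ids get_vive_wrist_ids_alt
  rw [pvBranches, PySem.List.sorted_eq_foldl_insertBy, ← pvFoldl_step _ [],
    PySem.List.foldl_if_eq_foldl_filter]
  congr 1
  exact (List.filter_congr (fun k _ => pvPred_eq k))
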